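-- pv_equiv track=rewrite | github.com/CAMeL-Lab/seq2seq-transliteration-tool | helpers/tag.py | nonZeroContext
-- ===== SOURCE A (Python) =====
-- def nonZeroContext(all_input_lines, context):
--     new_input_lines = []
--     lines_record = []
--
--     # Making tagged version of arabizi file
--     for line in all_input_lines:
--         line = line.strip().split()
--
--         lines_record.append(str(len(line)))
--
--         line = (["<bos>"] * context) + line  + (["<eos>"] * context)
--         for word in range(context, len(line) - context):
--             newLine = line[word - context: word] + ["<bow>", line[word], "<eow>"] + line[word + 1: word + context + 1]
--             strLine = " ".join(newLine)
--             new_input_lines.append(strLine)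
--
--     return new_input_lines, lines_record
-- ===== SOURCE B (Python) =====
-- def nonZeroContext(all_input_lines, context):
--     new_input_lines = []
--     lines_record = []
--     for line in all_input_lines:
--         words = line.strip().split()
--         n = len(words)
--         lines_record.append(str(n))
--         for i, w in enumerate(words):
--             left = ["<bos>"] * max(0, context - i) + words[max(0, i - context):i]
--             right = words[i + 1:i + 1 + context] + ["<eos>"] * max(0, i + 1 + context - n)
--             new_input_lines.append(" ".join(left + ["<bow>", w, "<eow>"] + right))
--     return new_input_lines, lines_record
-- ===== Notes on version B (the rewrite author's own statement) =====
-- stated objective: alternative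
-- what changed: B drops A's pad-with-<bos>/<eos>-then-uniform-slice strategy and instead, for each word index, computes the left/right context windows directly from the raw word list with boundary clamping (max(0,...) replicated padding), never building the padded list; Pre_ excludes negative context with a nonempty line list, where A raises IndexError.
import Mathlib
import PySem

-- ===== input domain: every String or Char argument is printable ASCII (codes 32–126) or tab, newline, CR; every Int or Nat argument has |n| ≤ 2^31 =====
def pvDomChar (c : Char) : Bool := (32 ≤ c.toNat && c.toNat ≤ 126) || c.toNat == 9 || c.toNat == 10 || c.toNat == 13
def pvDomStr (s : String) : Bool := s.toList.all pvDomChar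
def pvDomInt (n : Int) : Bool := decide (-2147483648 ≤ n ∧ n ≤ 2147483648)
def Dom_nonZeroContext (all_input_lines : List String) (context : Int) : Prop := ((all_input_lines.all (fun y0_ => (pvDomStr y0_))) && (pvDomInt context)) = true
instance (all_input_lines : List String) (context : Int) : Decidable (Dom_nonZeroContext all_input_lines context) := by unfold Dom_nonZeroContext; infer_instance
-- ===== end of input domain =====

-- B replaces A's pad-then-uniform-slice window construction by per-index boundary
-- clamping on the raw word list (alternative decomposition, same cost).

-- ===== PORT A =====
def nonZeroContext (all_input_lines : List String) (context : Int) : List String × List String :=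
  all_input_lines.foldl (fun acc line =>
    let ws := PySem.Str.split₀ (PySem.Str.strip line)
    let recs := acc.2 ++ [PySem.Int.toStr (ws.length : Int)]
    let padded := List.replicate context.toNat "<bos>" ++ ws ++ List.replicate context.toNat "<eos>"
    let news := (PySem.List.pyRange context ((padded.length : Int) - context) 1).foldl
      (fun ns w =>
        let newLine := PySem.List.slice padded (some (w - context)) (some w)
          ++ ["<bow>", PySem.List.pyGetD padded w "", "<eow>"]
          ++ PySem.List.slice padded (some (w + 1)) (some (w + context + 1))
        ns ++ [PySem.Str.join " " newLine]) acc.1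
    (news, recs)) ([], [])

-- ===== PORT B =====
def nonZeroContext_alt (all_input_lines : List String) (context : Int) : List String × List String :=
  all_input_lines.foldl (fun acc line =>
    let ws := PySem.Str.split₀ (PySem.Str.strip line)
    let n : Int := ws.length
    let news := (PySem.List.enumerate ws 0).foldl
      (fun ns p =>
        let left := List.replicate (max 0 (context - p.1)).toNat "<bos>"
          ++ PySem.List.slice ws (some (max 0 (p.1 - context))) (some p.1)
        let right := PySem.List.slice ws (some (p.1 + 1)) (some (p.1 + 1 + context))
          ++ List.replicate (max 0 (p.1 + 1 + context - n)).toNat "<eos>"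
        ns ++ [PySem.Str.join " " (left ++ ["<bow>", p.2, "<eow>"] ++ right)]) acc.1
    (news, acc.2 ++ [PySem.Int.toStr n])) ([], [])

-- ===== PRECONDITION & SPEC =====
-- Pre_ excludes negative context together with a nonempty list of lines: there A's
-- inner indexing line[word] goes out of range and Python raises IndexError.
def Pre_nonZeroContext (all_input_lines : List String) (context : Int) : Prop :=
  0 ≤ context ∨ all_input_lines = []
instance (all_input_lines : List String) (context : Int) : Decidable (Pre_nonZeroContext all_input_lines context) := by unfold Pre_nonZeroContext; infer_instance
def pvWitness_nonZeroContext : List String × Int := (["a b c", "", " x "], 2)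

def Spec_nonZeroContext (all_input_lines : List String) (context : Int) (out : List String × List String) : Prop := out = nonZeroContext_alt all_input_lines context
instance (all_input_lines : List String) (context : Int) (out : List String × List String) : Decidable (Spec_nonZeroContext all_input_lines context out) := by unfold Spec_nonZeroContext; infer_instance

-- ===== CLAIM (what is proved, stated in full; the proofs are below) =====
def Claim_equal_nonZeroContext : Prop := ∀ (all_input_lines : List String) (context : Int), Dom_nonZeroContext all_input_lines context → Pre_nonZeroContext all_input_lines context → Spec_nonZeroContext all_input_lines context (nonZeroContext all_input_lines context)

-- ===== LEMMAS AND PROOFS =====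

-- proof-side names for the two per-line step functions (definitionally the lambdas in the ports)
def stepA (context : Int) (acc : List String × List String) (line : String) : List String × List String :=
  let ws := PySem.Str.split₀ (PySem.Str.strip line)
  let recs := acc.2 ++ [PySem.Int.toStr (ws.length : Int)]
  let padded := List.replicate context.toNat "<bos>" ++ ws ++ List.replicate context.toNat "<eos>"
  let news := (PySem.List.pyRange context ((padded.length : Int) - context) 1).foldl
    (fun ns w =>
      let newLine := PySem.List.slice padded (some (w - context)) (some w)
        ++ ["<bow>", PySem.List.pyGetD padded w "", "<eow>"]
        ++ PySem.List.slice padded (some (w + 1)) (some (w + context + 1))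
      ns ++ [PySem.Str.join " " newLine]) acc.1
  (news, recs)

def stepB (context : Int) (acc : List String × List String) (line : String) : List String × List String :=
  let ws := PySem.Str.split₀ (PySem.Str.strip line)
  let n : Int := ws.length
  let news := (PySem.List.enumerate ws 0).foldl
    (fun ns p =>
      let left := List.replicate (max 0 (context - p.1)).toNat "<bos>"
        ++ PySem.List.slice ws (some (max 0 (p.1 - context))) (some p.1)
      let right := PySem.List.slice ws (some (p.1 + 1)) (some (p.1 + 1 + context))
        ++ List.replicate (max 0 (p.1 + 1 + context - n)).toNat "<eos>"
      ns ++ [PySem.Str.join " " (left ++ ["<bow>", p.2, "<eow>"] ++ right)]) acc.1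
  (news, acc.2 ++ [PySem.Int.toStr n])

lemma nonZeroContext_eq_foldl (lines : List String) (c : Int) :
    nonZeroContext lines c = lines.foldl (stepA c) ([], []) := rfl

lemma nonZeroContext_alt_eq_foldl (lines : List String) (c : Int) :
    nonZeroContext_alt lines c = lines.foldl (stepB c) ([], []) := rfl

lemma pad_left (m k : Nat) (ws : List String) (b e : String) (hk : k < ws.length) :
    ((List.replicate m b ++ ws ++ List.replicate m e).drop k).take m
      = List.replicate (m - k) b ++ (ws.drop (k - m)).take (k - (k - m)) := by
  apply List.ext_getElem?
  intro i
  simp only [List.getElem?_take, List.getElem?_drop, List.getElem?_append, List.getElem?_replicate,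
    List.length_replicate, List.length_append]
  split_ifs <;> first
    | rfl
    | omega
    | (congr 1; omega)

lemma pad_mid (m k : Nat) (ws : List String) (b e d : String) (hk : k < ws.length) :
    (List.replicate m b ++ ws ++ List.replicate m e).getD (m + k) d = ws.getD k d := by
  rw [List.getD_eq_getElem?_getD, List.getD_eq_getElem?_getD]
  simp only [List.getElem?_append, List.getElem?_replicate, List.length_replicate,
    List.length_append]
  split_ifs <;> first
    | rfl
    | omega
    | (congr 2; omega)

lemma pad_right (m k : Nat) (ws : List String) (b e : String) (hk : k < ws.length) :
    ((List.replicate m b ++ ws ++ List.replicate m e).drop (m + k + 1)).take m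
      = (ws.drop (k + 1)).take m ++ List.replicate (k + 1 + m - ws.length) e := by
  apply List.ext_getElem?
  intro i
  simp only [List.getElem?_take, List.getElem?_drop, List.getElem?_append, List.getElem?_replicate,
    List.length_replicate, List.length_append, List.length_drop, List.length_take]
  split_ifs <;> first
    | rfl
    | omega
    | (congr 1; omega)

lemma window_eq (m k : Nat) (ws : List String) (hk : k < ws.length) :
    PySem.List.slice (List.replicate m "<bos>" ++ ws ++ List.replicate m "<eos>") (some ((m : Int) + k - m)) (some ((m : Int) + k))
        ++ ["<bow>", PySem.List.pyGetD (List.replicate m "<bos>" ++ ws ++ List.replicate m "<eos>") ((m : Int) + k) "", "<eow>"]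
        ++ PySem.List.slice (List.replicate m "<bos>" ++ ws ++ List.replicate m "<eos>") (some ((m : Int) + k + 1)) (some ((m : Int) + k + m + 1))
      = (List.replicate (max 0 ((m : Int) - k)).toNat "<bos>" ++ PySem.List.slice ws (some (max 0 ((k : Int) - m))) (some (k : Int)))
        ++ ["<bow>", PySem.List.pyGetD ws (k : Int) "", "<eow>"]
        ++ (PySem.List.slice ws (some ((k : Int) + 1)) (some ((k : Int) + 1 + m)) ++ List.replicate (max 0 ((k : Int) + 1 + m - ws.length)).toNat "<eos>") := by
  have e1 : (m : Int) + k - m = ((k : Nat) : Int) := by omega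
  have e4 : (m : Int) + k + m + 1 = ((m + k + 1 + m : Nat) : Int) := by push_cast; ring
  have e3 : (m : Int) + k + 1 = ((m + k + 1 : Nat) : Int) := by push_cast; ring
  have e2 : (m : Int) + k = ((m + k : Nat) : Int) := by push_cast; ring
  have e5 : (max 0 ((m : Int) - k)).toNat = m - k := by omega
  have e6 : max 0 ((k : Int) - m) = ((k - m : Nat) : Int) := by omega
  have e7 : (k : Int) + 1 = ((k + 1 : Nat) : Int) := by push_cast; ring
  have e8 : (k : Int) + 1 + m = ((k + 1 + m : Nat) : Int) := by push_cast; ring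
  have e9 : (max 0 (((k + 1 + m : Nat) : Int) - ws.length)).toNat = k + 1 + m - ws.length := by omega
  rw [e1, e4, e3, e2, e5, e6, e8, e9, e7,
    PySem.List.slice_natCast, PySem.List.slice_natCast, PySem.List.slice_natCast,
    PySem.List.slice_natCast, PySem.List.pyGetD_natCast, PySem.List.pyGetD_natCast]
  have t1 : m + k - k = m := by omega
  have t2 : k + 1 + m - (k + 1) = m := by omega
  have t3 : m + k + 1 + m - (m + k + 1) = m := by omega
  rw [t1, t2, t3, pad_left m k ws _ _ hk, pad_mid m k ws _ _ _ hk, pad_right m k ws _ _ hk]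

lemma line_eq (c : Int) (hc : 0 ≤ c) (ws : List String) (init : List String) :
    (PySem.List.pyRange c (((List.replicate c.toNat "<bos>" ++ ws ++ List.replicate c.toNat "<eos>").length : Int) - c) 1).foldl
      (fun ns w =>
        ns ++ [PySem.Str.join " "
          (PySem.List.slice (List.replicate c.toNat "<bos>" ++ ws ++ List.replicate c.toNat "<eos>") (some (w - c)) (some w)
            ++ ["<bow>", PySem.List.pyGetD (List.replicate c.toNat "<bos>" ++ ws ++ List.replicate c.toNat "<eos>") w "", "<eow>"]
            ++ PySem.List.slice (List.replicate c.toNat "<bos>" ++ ws ++ List.replicate c.toNat "<eos>") (some (w + 1)) (some (w + c + 1)))]) init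
    = (PySem.List.enumerate ws 0).foldl
      (fun ns p =>
        ns ++ [PySem.Str.join " "
          ((List.replicate (max 0 (c - p.1)).toNat "<bos>" ++ PySem.List.slice ws (some (max 0 (p.1 - c))) (some p.1))
            ++ ["<bow>", p.2, "<eow>"]
            ++ (PySem.List.slice ws (some (p.1 + 1)) (some (p.1 + 1 + c)) ++ List.replicate (max 0 (p.1 + 1 + c - (ws.length : Int))).toNat "<eos>"))]) init := by
  obtain ⟨m, rfl⟩ : ∃ m : Nat, c = (m : Int) := ⟨c.toNat, (Int.toNat_of_nonneg hc).symm⟩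
  rw [PySem.List.foldl_append_singleton_eq_map, PySem.List.foldl_append_singleton_eq_map]
  congr 1
  have hlen : (((List.replicate (m : Int).toNat "<bos>" ++ ws ++ List.replicate (m : Int).toNat "<eos>").length : Int) - m) = (m : Int) + ws.length := by
    simp; omega
  rw [hlen, PySem.List.pyRange_one, PySem.List.enumerate_eq_map_pyRange ws "", PySem.List.pyRange_one,
    List.map_map, List.map_map, List.map_map]
  have harg : ((m : Int) + ws.length - m).toNat = ws.length := by omega
  have harg2 : (PySem.List.len ws - 0).toNat = ws.length := by simp [PySem.List.len]
  rw [harg, harg2]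
  refine List.map_congr_left ?_
  intro k hkmem
  have hk : k < ws.length := List.mem_range.mp hkmem
  simp only [Function.comp, Int.toNat_natCast, zero_add]
  exact congrArg (fun l => PySem.Str.join " " l) (window_eq m k ws hk)

set_option maxHeartbeats 1600000 in
lemma step_eq (c : Int) (hc : 0 ≤ c) (acc : List String × List String) (line : String) :
    stepA c acc line = stepB c acc line := by
  simp only [stepA, stepB]
  rw [line_eq c hc (PySem.Str.split₀ (PySem.Str.strip line)) acc.1]

set_option maxHeartbeats 1600000 in
lemma fold_eq (c : Int) (hc : 0 ≤ c) (lines : List String) (acc : List String × List String) :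
    lines.foldl (stepA c) acc = lines.foldl (stepB c) acc := by
  induction lines generalizing acc with
  | nil => rfl
  | cons x xs ih => rw [List.foldl_cons, List.foldl_cons, step_eq c hc, ih]

-- ===== VERDICT (by name: the statement is the Claim_ definition above) =====
set_option maxHeartbeats 1600000 in
theorem nonZeroContext_spec : Claim_equal_nonZeroContext := by
  intro lines c _ hpre
  unfold Spec_nonZeroContext
  rcases hpre with hc | rfl
  · rw [nonZeroContext_eq_foldl, nonZeroContext_alt_eq_foldl, fold_eq c hc]
  · rfl
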